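-- pv_equiv track=rewrite | github.com/nyomanjuniarta/Sampling | src/algo1.py | lineToSeq
-- ===== SOURCE A (Python) =====
-- def lineToSeq(lineInput):
--     returnSeq = list()
--     itemset = set()
--     splitResult = lineInput.split(' ')
--     for subStr in splitResult:
--         if subStr=='-1':
--             returnSeq.append(itemset)
--             itemset = set()
--         elif subStr=='-2\n':
--             return returnSeq
--         else:
--             itemset.add(subStr)
--     return returnSeq
-- ===== SOURCE B (Python) =====
-- def lineToSeq(lineInput):
--     tokens = lineInput.split(' ')
--     if '-2\n' in tokens:
--         tokens = tokens[:tokens.index('-2\n')]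
--     result = []
--     while '-1' in tokens:
--         i = tokens.index('-1')
--         result.append(set(tokens[:i]))
--         tokens = tokens[i + 1:]
--     return result
-- ===== Notes on version B (the rewrite author's own statement) =====
-- stated objective: alternative
-- what changed: Replaces A's single incremental loop (mutable itemset, early return on '-2\n') by truncating the token list at the first '-2\n' token and then repeatedly slicing off the group before the first '-1', appending set(group); same O(n) cost.
import Mathlib
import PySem

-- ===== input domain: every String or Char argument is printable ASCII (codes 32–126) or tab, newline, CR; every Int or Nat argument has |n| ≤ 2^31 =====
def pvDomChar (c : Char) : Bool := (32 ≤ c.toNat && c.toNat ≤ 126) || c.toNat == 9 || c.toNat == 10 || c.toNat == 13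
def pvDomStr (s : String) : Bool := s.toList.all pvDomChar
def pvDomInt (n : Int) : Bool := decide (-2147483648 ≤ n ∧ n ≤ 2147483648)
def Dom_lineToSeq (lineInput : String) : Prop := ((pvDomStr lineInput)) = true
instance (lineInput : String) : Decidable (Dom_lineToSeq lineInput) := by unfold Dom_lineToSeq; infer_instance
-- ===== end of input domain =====

-- B replaces A's single incremental loop (mutable itemset + early return) by: truncate the
-- token list at the first '-2\n', then repeatedly split off the run before the first '-1';
-- objective: alternative decomposition, same O(n) cost.

-- ===== PORT A =====
-- the for-loop of A, carrying (returnSeq, itemset); the '-2\n' branch is the early return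
def lineToSeqAux : List String → List (List String) → List String → List (List String)
  | [], returnSeq, _ => returnSeq
  | subStr :: rest, returnSeq, itemset =>
    if subStr = "-1" then lineToSeqAux rest (returnSeq ++ [itemset]) []
    else if subStr = "-2\n" then returnSeq
    else lineToSeqAux rest returnSeq (PySem.Set.add itemset subStr)

def lineToSeq (lineInput : String) : List (List String) :=
  lineToSeqAux ((PySem.Str.split? lineInput " ").getD []) [] []

-- ===== PORT B =====
-- Source B's while-loop: split off the group before the first '-1', recurse on the remainder
def lineToSeqGroups (tokens : List String) : List (List String) :=
  if h : "-1" ∈ tokens then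
    PySem.Set.ofList (tokens.take (tokens.idxOf "-1")) ::
      lineToSeqGroups (tokens.drop (tokens.idxOf "-1" + 1))
  else []
termination_by tokens.length
decreasing_by
  have hlt : tokens.idxOf "-1" < tokens.length := List.idxOf_lt_length_of_mem h
  simp [List.length_drop]; omega

def lineToSeq_alt (lineInput : String) : List (List String) :=
  let tokens := (PySem.Str.split? lineInput " ").getD []
  let tokens := if "-2\n" ∈ tokens then tokens.take (tokens.idxOf "-2\n") else tokens
  lineToSeqGroups tokens

-- ===== PRECONDITION & SPEC =====
def Spec_lineToSeq (lineInput : String) (out : List (List String)) : Prop := out = lineToSeq_alt lineInput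
instance (lineInput : String) (out : List (List String)) : Decidable (Spec_lineToSeq lineInput out) := by unfold Spec_lineToSeq; infer_instance

-- ===== CLAIM (what is proved, stated in full; the proofs are below) =====
def Claim_equal_lineToSeq : Prop := ∀ (lineInput : String), Dom_lineToSeq lineInput → Spec_lineToSeq lineInput (lineToSeq lineInput)

-- ===== LEMMAS AND PROOFS =====

-- truncation at the first '-2\n'
def pvTrunc (ts : List String) : List String :=
  if "-2\n" ∈ ts then ts.take (ts.idxOf "-2\n") else ts

-- proof-only reformulation of the grouping, carrying the current itemset
def pvH (cur : List String) : List String → List (List String)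
  | [] => []
  | t :: rest =>
    if t = "-1" then cur :: pvH [] rest
    else pvH (PySem.Set.add cur t) rest

theorem pvTrunc_cons_ne (t : String) (ts : List String) (h : t ≠ "-2\n") :
    pvTrunc (t :: ts) = t :: pvTrunc ts := by
  unfold pvTrunc
  by_cases hm : "-2\n" ∈ ts <;>
    simp [List.mem_cons, Ne.symm h, hm, List.idxOf_cons, beq_eq_false_iff_ne.mpr h]

theorem pvTrunc_cons_self (ts : List String) : pvTrunc ("-2\n" :: ts) = [] := by
  simp [pvTrunc]

theorem aux_eq_H (ts : List String) : ∀ (acc : List (List String)) (cur : List String),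
    lineToSeqAux ts acc cur = acc ++ pvH cur (pvTrunc ts) := by
  induction ts with
  | nil => intro acc cur; simp [lineToSeqAux, pvTrunc, pvH]
  | cons t rest ih =>
    intro acc cur
    by_cases h1 : t = "-1"
    · subst h1
      rw [pvTrunc_cons_ne _ _ (by decide)]
      simp [lineToSeqAux, pvH, ih]
    · by_cases h2 : t = "-2\n"
      · subst h2
        rw [pvTrunc_cons_self]
        simp [lineToSeqAux, pvH]
      · rw [pvTrunc_cons_ne _ _ h2]
        simp [lineToSeqAux, h1, h2, pvH, ih]

theorem H_of_not_mem (ts : List String) (cur : List String) (h : "-1" ∉ ts) :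
    pvH cur ts = [] := by
  induction ts generalizing cur with
  | nil => rfl
  | cons t rest ih =>
    have ht : t ≠ "-1" := fun he => h (he ▸ List.mem_cons_self ..)
    simp only [pvH, if_neg ht]
    exact ih _ (fun hm => h (List.mem_cons_of_mem _ hm))

theorem H_eq_groups (ts : List String) : ∀ (cur : List String),
    pvH cur ts = if "-1" ∈ ts then
      ((ts.take (ts.idxOf "-1")).foldl PySem.Set.add cur) :: pvH [] (ts.drop (ts.idxOf "-1" + 1))
    else [] := by
  induction ts with
  | nil => intro cur; simp [pvH]
  | cons t rest ih =>
    intro cur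
    by_cases h1 : t = "-1"
    · subst h1
      simp [pvH]
    · by_cases hm : "-1" ∈ rest
      · rw [pvH, if_neg h1, ih, if_pos hm, if_pos (List.mem_cons_of_mem _ hm)]
        have hidx : List.idxOf "-1" (t :: rest) = List.idxOf "-1" rest + 1 := by
          simp [List.idxOf_cons, beq_eq_false_iff_ne.mpr h1]
        rw [hidx]
        simp [List.take_succ_cons, List.drop_succ_cons, List.foldl_cons]
      · rw [pvH, if_neg h1, H_of_not_mem _ _ hm, if_neg]
        intro hc
        rcases List.mem_cons.mp hc with he | hm2
        · exact h1 he.symm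
        · exact hm hm2

theorem groups_eq_H (ts : List String) : lineToSeqGroups ts = pvH [] ts := by
  rw [lineToSeqGroups]
  by_cases h : "-1" ∈ ts
  · rw [dif_pos h, H_eq_groups, if_pos h, groups_eq_H]
    rfl
  · rw [dif_neg h, H_of_not_mem _ _ h]
termination_by ts.length
decreasing_by
  have hlt : ts.idxOf "-1" < ts.length := List.idxOf_lt_length_of_mem h
  simp [List.length_drop]; omega

-- ===== VERDICT (by name: the statement is the Claim_ definition above) =====
theorem lineToSeq_spec : Claim_equal_lineToSeq := by
  intro lineInput _
  unfold Spec_lineToSeq lineToSeq lineToSeq_alt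
  rw [aux_eq_H, groups_eq_H]
  simp [pvTrunc]
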